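-- pv_equiv track=rewrite | github.com/Dyeorn/Desafio_Dados_SD | Desafio_Logica_Programação/Exercicio2.py | encontrar_diferenca
-- ===== SOURCE A (Python) =====
-- def encontrar_diferenca(array):
--     array.sort()
--
--     menor_diferenca = float('inf')
--     pares_menor_diferenca = []
--
--     # Itera pelo array para encontrar a menor diferença.
--     for i in range(len(array) - 1):
--         # Calcula a diferença absoluta entre elementos adjacentes.
--         diferenca = abs(array[i] - array[i + 1])
--
--         # Verifica se a diferença é menor que a menor diferença atual.
--         if diferenca < menor_diferenca:
--             menor_diferenca = diferenca
--             pares_menor_diferenca = [(array[i], array[i + 1])]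
--
--         # Se a diferença for igual à menor diferença atual, adiciona o par à lista.
--         elif diferenca == menor_diferenca:
--             pares_menor_diferenca.append((array[i], array[i + 1]))
--
--
--     return pares_menor_diferenca
-- ===== SOURCE B (Python) =====
-- def encontrar_diferenca(array):
--     # Same in-place sort as A; return-value equivalence.
--     array.sort()
--
--     if len(array) < 2:
--         return []
--
--     # Build the adjacent pairs once, find the minimum gap, then filter.
--     pares = [(array[i], array[i + 1]) for i in range(len(array) - 1)]
--     menor = min(b - a for (a, b) in pares)
--     return [(a, b) for (a, b) in pares if b - a == menor]
-- ===== Notes on version B (the rewrite author's own statement) =====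
-- stated objective: simpler
-- what changed: Replaces the running-minimum loop that rebuilds/extends the pair list as it goes by a two-pass structure: compute the minimum adjacent gap with min(), then select the matching pairs with a filtering comprehension.
import Mathlib
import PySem

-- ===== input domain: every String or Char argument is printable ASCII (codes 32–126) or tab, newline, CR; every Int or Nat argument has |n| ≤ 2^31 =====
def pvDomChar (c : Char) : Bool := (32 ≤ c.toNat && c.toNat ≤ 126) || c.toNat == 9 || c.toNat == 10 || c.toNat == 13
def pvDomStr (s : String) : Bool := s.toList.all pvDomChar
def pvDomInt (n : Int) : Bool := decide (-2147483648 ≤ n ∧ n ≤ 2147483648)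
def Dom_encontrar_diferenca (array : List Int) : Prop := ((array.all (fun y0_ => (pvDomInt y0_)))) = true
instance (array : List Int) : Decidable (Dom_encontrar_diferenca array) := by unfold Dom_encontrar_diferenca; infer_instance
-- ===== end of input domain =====

-- B replaces A's running-minimum collecting loop by find-min-then-filter (two passes); objective: simpler.
-- Both Pythons sort the argument in place; the equivalence proved here is about the RETURN value.

-- ===== PORT A =====
-- menor_diferenca = float('inf') is modelled by Option Int (none = inf): the first
-- comparison 'diferenca < inf' is always true, exactly as the 'none' branch below.
def encontrar_diferenca (array : List Int) : List (Int × Int) :=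
  let s := PySem.List.sorted array (fun x => x) false
  let st := (PySem.List.pyRange 0 ((s.length : Int) - 1) 1).foldl
    (fun (st : Option Int × List (Int × Int)) i =>
      let a := PySem.List.pyGetD s i 0       -- index always in range here
      let b := PySem.List.pyGetD s (i + 1) 0
      let d := |a - b|
      match st.1 with
      | none => (some d, [(a, b)])
      | some m =>
        if d < m then (some d, [(a, b)])
        else if d = m then (some m, st.2 ++ [(a, b)])
        else st)
    (none, [])
  st.2

-- ===== PORT B =====
def encontrar_diferenca_alt (array : List Int) : List (Int × Int) :=
  let s := PySem.List.sorted array (fun x => x) false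
  if s.length < 2 then []
  else
    let pares := (PySem.List.pyRange 0 ((s.length : Int) - 1) 1).map
      (fun i => (PySem.List.pyGetD s i 0, PySem.List.pyGetD s (i + 1) 0))
    match PySem.List.min? (pares.map (fun p => p.2 - p.1)) (fun x => x) with
    | none => []   -- unreachable: pares ≠ [] when length ≥ 2
    | some menor => pares.filter (fun p => p.2 - p.1 == menor)

-- ===== PRECONDITION & SPEC =====
def Spec_encontrar_diferenca (array : List Int) (out : List (Int × Int)) : Prop := out = encontrar_diferenca_alt array
instance (array : List Int) (out : List (Int × Int)) : Decidable (Spec_encontrar_diferenca array out) := by unfold Spec_encontrar_diferenca; infer_instance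

-- ===== CLAIM (what is proved, stated in full; the proofs are below) =====
def Claim_equal_encontrar_diferenca : Prop := ∀ (array : List Int), Dom_encontrar_diferenca array → Spec_encontrar_diferenca array (encontrar_diferenca array)

-- ===== LEMMAS AND PROOFS =====

-- A's loop body, abstracted over the pair and its gap function.
def pvStep (f : Int × Int → Int) (st : Option Int × List (Int × Int)) (p : Int × Int) :
    Option Int × List (Int × Int) :=
  match st.1 with
  | none => (some (f p), [p])
  | some m =>
    if f p < m then (some (f p), [p])
    else if f p = m then (some m, st.2 ++ [p])
    else st

-- the running minimum of f over a list, none on []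
def pvMinO (f : Int × Int → Int) (P : List (Int × Int)) : Option Int :=
  P.foldl (fun m p => match m with | none => some (f p) | some m => some (min m (f p))) none

theorem pvFoldlSome (f : Int × Int → Int) (t : List (Int × Int)) (m : Int) :
    t.foldl (fun m p => match m with | none => some (f p) | some m => some (min m (f p))) (some m)
      = some (t.foldl (fun m p => min m (f p)) m) := by
  induction t generalizing m with
  | nil => rfl
  | cons p t ih => simp [List.foldl, ih]

theorem pvMinO_cons (f : Int × Int → Int) (p : Int × Int) (t : List (Int × Int)) :
    pvMinO f (p :: t) = some (t.foldl (fun m q => min m (f q)) (f p)) := by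
  simp [pvMinO, List.foldl, pvFoldlSome]

theorem pvFoldlMin_le (f : Int × Int → Int) (t : List (Int × Int)) (a : Int) :
    t.foldl (fun m q => min m (f q)) a ≤ a ∧ ∀ q ∈ t, t.foldl (fun m q => min m (f q)) a ≤ f q := by
  induction t generalizing a with
  | nil => simp
  | cons p t ih =>
    obtain ⟨h1, h2⟩ := ih (min a (f p))
    refine ⟨le_trans h1 (min_le_left _ _), ?_⟩
    intro q hq
    rw [List.mem_cons] at hq
    rcases hq with hq | hq
    · exact le_trans h1 (by simp [hq])
    · exact h2 q hq

theorem pvMinO_le (f : Int × Int → Int) (P : List (Int × Int)) (M : Int)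
    (h : pvMinO f P = some M) : ∀ q ∈ P, M ≤ f q := by
  cases P with
  | nil => simp [pvMinO] at h
  | cons p t =>
    rw [pvMinO_cons] at h
    injection h with h
    intro q hq
    rw [List.mem_cons] at hq
    rcases hq with hq | hq
    · subst h hq; exact (pvFoldlMin_le f t (f q)).1
    · subst h; exact (pvFoldlMin_le f t (f p)).2 q hq

theorem pvMinO_append_singleton (f : Int × Int → Int) (P : List (Int × Int)) (p : Int × Int)
    (M : Int) (h : pvMinO f P = some M) :
    pvMinO f (P ++ [p]) = some (min M (f p)) := by
  cases P with
  | nil => simp [pvMinO] at h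
  | cons q t =>
    rw [pvMinO_cons] at h
    injection h with h
    rw [List.cons_append, pvMinO_cons, List.foldl_append]
    simp [h]

-- the heart: A's running-minimum collecting loop computes (min, filter-by-min)
theorem pvLoop (f : Int × Int → Int) (P : List (Int × Int)) :
    P.foldl (pvStep f) (none, []) =
      (pvMinO f P,
       match pvMinO f P with
       | none => []
       | some M => P.filter (fun p => f p == M)) := by
  induction P using List.reverseRecOn with
  | nil => rfl
  | append_singleton P p ih =>
    rw [List.foldl_append, ih]
    cases hM : pvMinO f P with
    | none =>
      have hP : P = [] := by
        cases P with
        | nil => rfl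
        | cons q t => rw [pvMinO_cons] at hM; exact absurd hM (by simp)
      subst hP
      simp [pvStep, pvMinO, List.foldl]
    | some M =>
      rw [pvMinO_append_singleton f P p M hM]
      have hle := pvMinO_le f P M hM
      by_cases h1 : f p < M
      · have hmin : min M (f p) = f p := by omega
        have hfilt : P.filter (fun q => f q == f p) = [] := by
          rw [List.filter_eq_nil_iff]
          intro q hq
          have := hle q hq
          simp only [beq_iff_eq]
          omega
        simp [pvStep, h1, hmin, List.filter_append, hfilt]
      · by_cases h2 : f p = M
        · have hmin : min M (f p) = M := by omega
          simp [pvStep, h2, List.filter_append]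
        · have hmin : min M (f p) = M := by omega
          have : ¬ (f p == M) = true := by simp [h2]
          simp [pvStep, h1, h2, hmin, List.filter_append, this]

-- pvMinO agrees with Python's min() over the mapped gaps
theorem pvMinO_eq_min? (f : Int × Int → Int) (P : List (Int × Int)) :
    pvMinO f P = PySem.List.min? (P.map f) (fun x => x) := by
  cases P with
  | nil => rfl
  | cons p t =>
    rw [pvMinO_cons, List.map_cons, PySem.List.min?_id_cons, List.foldl_map]

-- adjacent elements of an ordered list: |a − b| = b − a
theorem pvPairAbs (s : List Int) (hp : s.Pairwise (· ≤ ·)) (i : Int)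
    (h0 : 0 ≤ i) (h1 : i < (s.length : Int) - 1) :
    |PySem.List.pyGetD s i 0 - PySem.List.pyGetD s (i + 1) 0|
      = PySem.List.pyGetD s (i + 1) 0 - PySem.List.pyGetD s i 0 := by
  have hi : i.toNat < s.length := by omega
  have hi1 : (i + 1).toNat < s.length := by omega
  rw [PySem.List.pyGetD_eq_getElem s 0 h0 (by omega),
      PySem.List.pyGetD_eq_getElem s 0 (by omega) (by omega)]
  have hmono : s[i.toNat] ≤ s[(i + 1).toNat] :=
    List.pairwise_iff_getElem.mp hp i.toNat (i + 1).toNat hi hi1 (by omega)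
  rw [abs_of_nonpos (by omega)]
  omega

-- ===== VERDICT (by name: the statement is the Claim_ definition above) =====
theorem encontrar_diferenca_spec : Claim_equal_encontrar_diferenca := by
  intro array _
  unfold Spec_encontrar_diferenca encontrar_diferenca encontrar_diferenca_alt
  set s := PySem.List.sorted array (fun x => x) false with hs
  set R := PySem.List.pyRange 0 ((s.length : Int) - 1) 1 with hR
  set h := fun i => (PySem.List.pyGetD s i 0, PySem.List.pyGetD s (i + 1) 0) with hh
  change ((R.foldl (fun st i => pvStep (fun p : Int × Int => |p.1 - p.2|) st (h i))
      ((none : Option Int), ([] : List (Int × Int)))).2 = _)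
  rw [← List.foldl_map]
  have hcongr : (R.map h).foldl (pvStep (fun p : Int × Int => |p.1 - p.2|)) (none, [])
      = (R.map h).foldl (pvStep (fun p : Int × Int => p.2 - p.1)) (none, []) := by
    apply PySem.List.foldl_congr_mem
    intro acc p hp
    obtain ⟨i, hi, rfl⟩ := List.mem_map.mp hp
    rw [hR, PySem.List.mem_pyRange_one] at hi
    have hpw : s.Pairwise (· ≤ ·) := by
      rw [hs]; exact PySem.List.sorted_pairwise array (fun x => x)
    have habs := pvPairAbs s hpw i hi.1 hi.2
    simp only [pvStep, hh]
    rw [habs]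
  rw [hcongr, pvLoop]
  by_cases hlen : s.length < 2
  · have hRnil : R = [] := by rw [hR]; exact PySem.List.pyRange_one_eq_nil (by omega)
    simp [hRnil, pvMinO, hlen]
  · simp only [if_neg hlen]
    rw [pvMinO_eq_min?]
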